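-- pv_equiv track=rewrite | github.com/GRID-INTELLIGENCE/GRID | src/grid/security/parasite_tracer.py | _build_import_chain
-- ===== SOURCE A (Python) =====
-- def _build_import_chain(module_name: str) -> list[str]:
--     """Build the import chain for a module."""
--     chain: list[str] = []
--     current = module_name
--
--     while current:
--         chain.append(current)
--         if "." in current:
--             current = current.rsplit(".", 1)[0]
--         else:
--             break
--
--     return list(reversed(chain))
-- ===== SOURCE B (Python) =====
-- def _build_import_chain(module_name: str) -> list[str]:
--     """Build the import chain for a module by one forward character scan."""
--     chain: list[str] = []
--     prefix = ""
--     for ch in module_name: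
--         if ch == "." and prefix:
--             chain.append(prefix)
--         prefix += ch
--     if prefix:
--         chain.append(prefix)
--     return chain
-- ===== Notes on version B (the rewrite author's own statement) =====
-- stated objective: alternative
-- what changed: Replaces A's backward while-loop (which repeatedly strips the last dot-separated segment with rsplit and finally reverses the collected chain) by a single forward character scan that appends each nonempty dotted prefix the moment it reaches a separator, so repeated suffix stripping and the final reversal disappear.
import Mathlib
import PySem

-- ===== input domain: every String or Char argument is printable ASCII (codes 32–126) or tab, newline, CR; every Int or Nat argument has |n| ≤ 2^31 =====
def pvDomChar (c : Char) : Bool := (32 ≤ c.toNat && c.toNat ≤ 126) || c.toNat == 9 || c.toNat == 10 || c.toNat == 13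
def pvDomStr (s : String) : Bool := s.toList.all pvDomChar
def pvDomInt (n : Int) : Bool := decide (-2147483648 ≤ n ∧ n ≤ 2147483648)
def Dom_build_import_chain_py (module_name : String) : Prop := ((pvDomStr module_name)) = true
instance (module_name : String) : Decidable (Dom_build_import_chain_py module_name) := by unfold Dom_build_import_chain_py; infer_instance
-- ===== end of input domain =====

-- B replaces A's backward rsplit-and-reverse loop by a single forward character scan
-- that emits each nonempty dotted prefix whenever it reaches a separator (objective: alternative).

-- ===== PORT A =====
-- hand port of current.rsplit(sep, 1)[0] for a string containing the dot separator:
-- drop the last dot-separated segment, i.e. keep everything before the LAST separator (exact there).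
def dropLastSegA (cs : List Char) : List Char :=
  ((cs.reverse.dropWhile (fun c => c != '.')).tail).reverse

lemma dropLastSegA_length_lt (cs : List Char)
    (h : PySem.Chars.isIn ['.'] cs = true) : (dropLastSegA cs).length < cs.length := by
  have hmem : '.' ∈ cs := by
    have := (PySem.Chars.isIn_iff_infix (sub := ['.']) (s := cs)).mp h
    exact this.subset (by simp)
  have hne : cs.reverse.dropWhile (fun c => c != '.') ≠ [] := by
    intro hnil
    have := List.dropWhile_eq_nil_iff.mp hnil ('.') (by simpa using hmem)
    simp at this
  have h1 : (cs.reverse.dropWhile (fun c => c != '.')).length ≤ cs.length := by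
    simpa using List.length_dropWhile_le (p := fun c => c != '.') (l := cs.reverse)
  have h2 : 0 < (cs.reverse.dropWhile (fun c => c != '.')).length :=
    List.length_pos_iff.mpr hne
  simp only [dropLastSegA, List.length_reverse, List.length_tail]
  omega

-- the while loop of A: append current, strip the last segment while a separator remains
def chainLoopA (current : List Char) (chain : List (List Char)) : List (List Char) :=
  if current = [] then chain
  else
    let chain2 := chain ++ [current]
    if h : PySem.Chars.isIn ['.'] current = true then
      chainLoopA (dropLastSegA current) chain2
    else chain2
termination_by current.length
decreasing_by exact dropLastSegA_length_lt current h

def build_import_chain_py (module_name : String) : List String :=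
  ((chainLoopA module_name.toList []).reverse).map String.mk

-- ===== PORT B =====
-- one step of B's forward scan: state = (chain so far, prefix of the characters seen)
def altStep (st : List (List Char) × List Char) (ch : Char) : List (List Char) × List Char :=
  ((if ch = '.' ∧ st.2 ≠ [] then st.1 ++ [st.2] else st.1), st.2 ++ [ch])

-- the final 'if prefix: chain.append(prefix)'
def altFinalize (st : List (List Char) × List Char) : List (List Char) :=
  if st.2 ≠ [] then st.1 ++ [st.2] else st.1

def build_import_chain_py_alt (module_name : String) : List String :=
  (altFinalize (module_name.toList.foldl altStep ([], []))).map String.mk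

-- ===== PRECONDITION & SPEC =====
def Spec_build_import_chain_py (module_name : String) (out : List String) : Prop := out = build_import_chain_py_alt module_name
instance (module_name : String) (out : List String) : Decidable (Spec_build_import_chain_py module_name out) := by unfold Spec_build_import_chain_py; infer_instance

-- ===== CLAIM (what is proved, stated in full; the proofs are below) =====
def Claim_equal_build_import_chain_py : Prop := ∀ (module_name : String), Dom_build_import_chain_py module_name → Spec_build_import_chain_py module_name (build_import_chain_py module_name)

-- ===== LEMMAS AND PROOFS =====

-- B's result on a character list (definitionally the body of the alt port)
def bFull (cs : List Char) : List (List Char) :=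
  altFinalize (cs.foldl altStep ([], []))

-- the chain entries B appends while scanning cs with accumulated prefix p
def chainAdd (p : List Char) : List Char → List (List Char)
  | [] => []
  | ch :: t => (if ch = '.' ∧ p ≠ [] then [p] else []) ++ chainAdd (p ++ [ch]) t

lemma foldl_altStep (cs : List Char) : ∀ c p,
    cs.foldl altStep (c, p) = (c ++ chainAdd p cs, p ++ cs) := by
  induction cs with
  | nil => intro c p; simp [chainAdd]
  | cons ch t ih =>
    intro c p
    simp only [List.foldl_cons, altStep, chainAdd]
    split_ifs with h <;> simp [ih]

lemma chainAdd_append (xs : List Char) : ∀ p ys,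
    chainAdd p (xs ++ ys) = chainAdd p xs ++ chainAdd (p ++ xs) ys := by
  induction xs with
  | nil => intro p ys; simp [chainAdd]
  | cons ch t ih => intro p ys; simp [chainAdd, ih]

lemma chainAdd_nodot (cs : List Char) (h : '.' ∉ cs) : ∀ p, chainAdd p cs = [] := by
  induction cs with
  | nil => intro p; simp [chainAdd]
  | cons ch t ih =>
    intro p
    have hch : ch ≠ '.' := by rintro rfl; exact h (by simp)
    have ht : '.' ∉ t := fun hm => h (by simp [hm])
    have hcond : ¬(ch = '.' ∧ p ≠ []) := fun hx => hch hx.1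
    simp [chainAdd, hcond, ih ht]

lemma bFull_eq (cs : List Char) :
    bFull cs = if cs ≠ [] then chainAdd [] cs ++ [cs] else chainAdd [] cs := by
  simp only [bFull, foldl_altStep, altFinalize, List.nil_append]

lemma bFull_nodot (cs : List Char) (h : '.' ∉ cs) :
    bFull cs = if cs = [] then [] else [cs] := by
  rw [bFull_eq, chainAdd_nodot cs h]
  by_cases hc : cs = [] <;> simp [hc]

lemma bFull_step (pre seg : List Char) (h : '.' ∉ seg) :
    bFull (pre ++ '.' :: seg) = bFull pre ++ [pre ++ '.' :: seg] := by
  have h1 : chainAdd [] (pre ++ '.' :: seg)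
      = chainAdd [] pre ++ (if pre ≠ [] then [pre] else []) := by
    rw [chainAdd_append]
    simp [chainAdd, chainAdd_nodot seg h]
  rw [bFull_eq, bFull_eq]
  simp only [h1]
  by_cases hp : pre = [] <;> simp [hp, chainAdd]

lemma decomp_last_dot (cs : List Char) (h : '.' ∈ cs) :
    ∃ pre seg, cs = pre ++ '.' :: seg ∧ '.' ∉ seg := by
  induction cs with
  | nil => simp at h
  | cons ch t ih =>
    by_cases ht : '.' ∈ t
    · obtain ⟨pre, seg, heq, hns⟩ := ih ht
      exact ⟨ch :: pre, seg, by simp [heq], hns⟩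
    · have hch : ch = '.' := by
        rcases List.mem_cons.mp h with h' | h'
        · exact h'.symm
        · exact absurd h' ht
      exact ⟨[], t, by simp [hch], ht⟩

lemma dropLastSegA_decomp (pre seg : List Char) (h : '.' ∉ seg) :
    dropLastSegA (pre ++ '.' :: seg) = pre := by
  have hrev : (pre ++ '.' :: seg).reverse = seg.reverse ++ '.' :: pre.reverse := by
    simp
  have hdw : seg.reverse.dropWhile (fun c => c != '.') = [] := by
    rw [List.dropWhile_eq_nil_iff]
    intro a ha
    have : a ≠ '.' := by rintro rfl; exact h (by simpa using ha)
    simpa using this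
  unfold dropLastSegA
  rw [hrev, List.dropWhile_append, hdw]
  simp

lemma isIn_dot_iff (cs : List Char) :
    PySem.Chars.isIn ['.'] cs = true ↔ '.' ∈ cs := by
  rw [PySem.Chars.isIn_iff_infix]
  constructor
  · intro h; exact h.subset (by simp)
  · intro h
    obtain ⟨s, t, rfl⟩ := List.append_of_mem h
    exact ⟨s, t, by simp⟩

lemma chainLoopA_acc : ∀ n (cs : List Char), cs.length ≤ n → ∀ chain,
    chainLoopA cs chain = chain ++ chainLoopA cs [] := by
  intro n
  induction n with
  | zero =>
    intro cs hlen chain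
    have : cs = [] := List.length_eq_zero_iff.mp (Nat.le_zero.mp hlen)
    subst this
    rw [chainLoopA, chainLoopA]
    simp
  | succ n ih =>
    intro cs hlen chain
    by_cases hc : cs = []
    · subst hc; rw [chainLoopA, chainLoopA]; simp
    · rw [chainLoopA, chainLoopA]
      simp only [hc, if_false]
      by_cases hd : PySem.Chars.isIn ['.'] cs = true
      · simp only [hd, dif_pos]
        have hlt := dropLastSegA_length_lt cs hd
        rw [ih (dropLastSegA cs) (by omega) (chain ++ [cs]),
            ih (dropLastSegA cs) (by omega) ([] ++ [cs])]
        simp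
      · simp [hd]

lemma chainLoopA_eq_bFull : ∀ n (cs : List Char), cs.length ≤ n →
    chainLoopA cs [] = (bFull cs).reverse := by
  intro n
  induction n with
  | zero =>
    intro cs hlen
    have : cs = [] := List.length_eq_zero_iff.mp (Nat.le_zero.mp hlen)
    subst this
    rw [chainLoopA]
    simp [bFull, altFinalize]
  | succ n ih =>
    intro cs hlen
    by_cases hc : cs = []
    · subst hc; rw [chainLoopA]; simp [bFull, altFinalize]
    · rw [chainLoopA]
      simp only [hc, if_false]
      by_cases hd : PySem.Chars.isIn ['.'] cs = true
      · simp only [hd, dif_pos]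
        have hmem : '.' ∈ cs := (isIn_dot_iff cs).mp hd
        obtain ⟨pre, seg, rfl, hns⟩ := decomp_last_dot cs hmem
        rw [dropLastSegA_decomp pre seg hns]
        have hprelen : pre.length ≤ n := by
          simp only [List.length_append, List.length_cons] at hlen
          omega
        rw [chainLoopA_acc n pre hprelen, ih pre hprelen, bFull_step pre seg hns]
        simp
      · have hmem : '.' ∉ cs := by
          intro hm; exact hd ((isIn_dot_iff cs).mpr hm)
        rw [bFull_nodot cs hmem]
        simp [hd, hc]

-- ===== VERDICT (by name: the statement is the Claim_ definition above) =====
theorem build_import_chain_py_spec : Claim_equal_build_import_chain_py := by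
  intro s _
  unfold Spec_build_import_chain_py build_import_chain_py build_import_chain_py_alt
  rw [chainLoopA_eq_bFull s.toList.length s.toList (le_refl _)]
  simp [bFull]
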